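-- pv_equiv track=rewrite | github.com/BigTuna08/par_lgp | py/analyze.py | find_br_points
-- ===== SOURCE A (Python) =====
-- def find_br_points(prog_lines):
--     last_br = False
--     br_points = []
--     i = 0
--     for line in prog_lines:
--         if "Skip" in line:
--             last_br = True
--         else:
--             if last_br is True:
--                 br_points.append(i)
--             last_br = False
--         i += 1
--     return br_points
-- ===== SOURCE B (Python) =====
-- def _rle(mask):
--     """Run-length encode a boolean list into [(flag, run_length), ...]."""
--     runs = []
--     i = 0
--     n = len(mask)
--     while i < n:
--         j = i + 1
--         while j < n and mask[j] == mask[i]: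
--             j += 1
--         runs.append((mask[i], j - i))
--         i = j
--     return runs
--
-- def find_br_points(prog_lines):
--     # Stage 1: boolean mask; Stage 2: run-length encode it; Stage 3: a
--     # non-Skip run that is not the first run starts right after a Skip run,
--     # so emit its starting position.
--     mask = ["Skip" in line for line in prog_lines]
--     out = []
--     pos = 0
--     for k, (f, length) in enumerate(_rle(mask)):
--         if not f and k > 0:
--             out.append(pos)
--         pos += length
--     return out
-- ===== Notes on version B (the rewrite author's own statement) =====
-- stated objective: alternative
-- what changed: Replaced A's single-pass state machine carrying a last_br flag by a staged pipeline: build the boolean Skip-mask, run-length encode it, then emit the starting position of every non-Skip run that is not the first run.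
import Mathlib
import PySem

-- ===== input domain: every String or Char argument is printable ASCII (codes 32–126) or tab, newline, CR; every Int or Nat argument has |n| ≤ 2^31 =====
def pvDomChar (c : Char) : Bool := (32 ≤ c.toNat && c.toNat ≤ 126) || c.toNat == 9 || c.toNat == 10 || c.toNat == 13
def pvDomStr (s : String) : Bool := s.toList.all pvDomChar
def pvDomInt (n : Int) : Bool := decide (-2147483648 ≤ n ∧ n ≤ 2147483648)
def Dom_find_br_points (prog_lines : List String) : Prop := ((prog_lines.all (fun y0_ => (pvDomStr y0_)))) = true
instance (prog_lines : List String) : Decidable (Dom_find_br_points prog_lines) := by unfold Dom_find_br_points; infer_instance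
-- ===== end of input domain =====

-- B replaces A's last_br state machine by a staged pipeline (Skip-mask, run-length encoding,
-- then emitting the start of every non-first non-Skip run); objective: alternative, return value only.


-- ===== PORT A =====
-- "Skip" in line (PySem.Str.isIn is exact Python substring membership)
def hasSkip (line : String) : Bool := PySem.Str.isIn "Skip" line

-- A's loop over prog_lines carrying (last_br, br_points, i)
def findBrGo : List String → Bool → List Int → Int → List Int
  | [], _, br_points, _ => br_points
  | line :: rest, last_br, br_points, i =>
    if hasSkip line then
      findBrGo rest true br_points (i + 1)
    else
      findBrGo rest false (if last_br then br_points ++ [i] else br_points) (i + 1)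

def find_br_points (prog_lines : List String) : List Int :=
  findBrGo prog_lines false [] 0

-- ===== PORT B =====
-- _rle: run-length encode a boolean list (inner while = count of equal flags after the head)
def rleB : List Bool → List (Bool × Int)
  | [] => []
  | f :: rest =>
    (f, 1 + ((rest.takeWhile (fun b => b == f)).length : Int))
      :: rleB (rest.dropWhile (fun b => b == f))
termination_by m => m.length
decreasing_by
  exact Nat.lt_succ_of_le (List.length_dropWhile_le _ _)

-- stage 3 loop: enumerate runs with index k, cumulative position pos
def scanRunsB : Int → Int → List (Bool × Int) → List Int
  | _, _, [] => []
  | k, pos, (f, len) :: rest =>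
    (if f = false ∧ k > 0 then [pos] else []) ++ scanRunsB (k + 1) (pos + len) rest

def find_br_points_alt (prog_lines : List String) : List Int :=
  scanRunsB 0 0 (rleB (prog_lines.map hasSkip))

-- ===== PRECONDITION & SPEC =====
def Spec_find_br_points (prog_lines : List String) (out : List Int) : Prop := out = find_br_points_alt prog_lines
instance (prog_lines : List String) (out : List Int) : Decidable (Spec_find_br_points prog_lines out) := by unfold Spec_find_br_points; infer_instance

-- ===== CLAIM (what is proved, stated in full; the proofs are below) =====
def Claim_equal_find_br_points : Prop := ∀ (prog_lines : List String), Dom_find_br_points prog_lines → Spec_find_br_points prog_lines (find_br_points prog_lines)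

-- ===== LEMMAS AND PROOFS =====

-- A's loop expressed over the mask list (bridge between the two ports)
def goM : List Bool → Bool → Int → List Int
  | [], _, _ => []
  | f :: rest, lb, i => (if f = false ∧ lb = true then [i] else []) ++ goM rest f (i + 1)

theorem findBrGo_acc (ls : List String) (lb : Bool) (br : List Int) (i : Int) :
    findBrGo ls lb br i = br ++ findBrGo ls lb [] i := by
  induction ls generalizing lb br i with
  | nil => simp [findBrGo]
  | cons x rest ih =>
    simp only [findBrGo]
    split_ifs with hx hlb
    · exact ih true br (i + 1)
    · rw [ih false (br ++ [i]), ih false ([] ++ [i])]; simp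
    · exact ih false br (i + 1)

theorem findBrGo_eq_goM (ls : List String) (lb : Bool) (i : Int) :
    findBrGo ls lb [] i = goM (ls.map hasSkip) lb i := by
  induction ls generalizing lb i with
  | nil => simp [findBrGo, goM]
  | cons x rest ih =>
    simp only [findBrGo, List.map, goM]
    by_cases hx : hasSkip x = true
    · simp [hx, ih]
    · simp only [Bool.not_eq_true] at hx
      rw [findBrGo_acc rest false]
      cases lb <;> simp [hx, ih]

-- goM skips over the rest of a constant-flag run without emitting anything
theorem goM_run (pre : List Bool) (f : Bool) (h : ∀ x ∈ pre, x = f) (tl : List Bool) (i : Int) :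
    goM (pre ++ tl) f i = goM tl f (i + pre.length) := by
  induction pre generalizing i with
  | nil => simp
  | cons x p ih =>
    have hx : x = f := h x (by simp)
    simp only [List.cons_append, goM, hx]
    rw [ih (fun y hy => h y (by simp [hy])) (i + 1)]
    have : i + 1 + (p.length : Int) = i + ((p.length : Int) + 1) := by ring
    cases f <;> simp [this]

-- main bridge: goM on a run boundary equals the run scan
theorem goM_eq_scan (m : List Bool) : ∀ (lb : Bool) (i k : Int),
    (m = [] ∨ ∃ f r, m = f :: r ∧ ((k = 0 ∧ lb = false) ∨ (0 < k ∧ lb = !f))) →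
    goM m lb i = scanRunsB k i (rleB m) := by
  induction m using rleB.induct with
  | case1 => intro lb i k _; simp [goM, rleB, scanRunsB]
  | case2 f rest ih =>
    intro lb i k hinv
    obtain ⟨f', r', heq, hfr⟩ := hinv.resolve_left (by simp)
    injection heq with hf hr
    subst hf hr
    simp only [goM, rleB, scanRunsB]
    have hsplit : rest = rest.takeWhile (fun b => b == f) ++ rest.dropWhile (fun b => b == f) :=
      (List.takeWhile_append_dropWhile).symm
    have hall : ∀ x ∈ rest.takeWhile (fun b => b == f), x = f := by
      intro x hx
      have := List.mem_takeWhile_imp hx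
      simpa using this
    conv_lhs => rw [hsplit]
    rw [goM_run _ f hall]
    -- emitted head element matches
    have hemit : (if f = false ∧ lb = true then [i] else []) = (if f = false ∧ k > 0 then [i] else []) := by
      rcases hfr with ⟨hk, hlb⟩ | ⟨hk, hlb⟩
      · subst hk hlb; cases f <;> simp
      · subst hlb; cases f <;> simp <;> omega
    rw [hemit]
    congr 1
    have := ih f (i + 1 + (rest.takeWhile (fun b => b == f)).length) (k + 1) ?_
    · rw [this]
      congr 1
      ring
    · cases hd : rest.dropWhile (fun b => b == f) with
      | nil => exact Or.inl rfl
      | cons y ys =>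
        have hk1 : (0 : Int) < k + 1 := by
          rcases hfr with ⟨hk, _⟩ | ⟨hk, _⟩ <;> omega
        refine Or.inr ⟨y, ys, rfl, Or.inr ⟨hk1, ?_⟩⟩
        have hy : (y == f) = false := by
          have := List.head?_dropWhile_not (p := fun b => b == f) (l := rest)
          rw [hd] at this
          simpa using this
        revert hy
        cases y <;> cases f <;> decide

-- ===== VERDICT (by name: the statement is the Claim_ definition above) =====
theorem find_br_points_spec : Claim_equal_find_br_points := by
  intro ls _
  unfold Spec_find_br_points find_br_points find_br_points_alt
  rw [findBrGo_eq_goM]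
  apply goM_eq_scan
  cases h : ls.map hasSkip with
  | nil => exact Or.inl rfl
  | cons f r => exact Or.inr ⟨f, r, rfl, Or.inl ⟨rfl, rfl⟩⟩
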